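-- pv_equiv track=rewrite | github.com/PurushottamKParakh/autodub | backend/utils.py | validate_youtube_url
-- ===== SOURCE A (Python) =====
-- def validate_youtube_url(url):
--     """
--     Validate if URL is a valid YouTube URL
--
--     Args:
--         url: URL to validate
--
--     Returns:
--         bool: True if valid YouTube URL
--     """
--     youtube_patterns = [
--         'youtube.com/watch?v=',
--         'youtu.be/',
--         'youtube.com/embed/',
--         'youtube.com/v/'
--     ]
--
--     return any(pattern in url for pattern in youtube_patterns)
-- ===== SOURCE B (Python) =====
-- def validate_youtube_url(url):
--     """
--     Validate if URL is a valid YouTube URL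
--
--     Single left-to-right scan: at each position, test whether any of the
--     YouTube markers starts there, instead of one full substring search per
--     pattern.
--     """
--     patterns = (
--         'youtube.com/watch?v=',
--         'youtu.be/',
--         'youtube.com/embed/',
--         'youtube.com/v/',
--     )
--     s = url
--     while s:
--         if any(s.startswith(p) for p in patterns):
--             return True
--         s = s[1:]
--     return False
-- ===== Notes on version B (the rewrite author's own statement) =====
-- stated objective: alternative
-- what changed: Replaces four independent substring searches ('pattern in url' per pattern) with one left-to-right scan that tests at each position whether any pattern starts there.
import Mathlib
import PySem

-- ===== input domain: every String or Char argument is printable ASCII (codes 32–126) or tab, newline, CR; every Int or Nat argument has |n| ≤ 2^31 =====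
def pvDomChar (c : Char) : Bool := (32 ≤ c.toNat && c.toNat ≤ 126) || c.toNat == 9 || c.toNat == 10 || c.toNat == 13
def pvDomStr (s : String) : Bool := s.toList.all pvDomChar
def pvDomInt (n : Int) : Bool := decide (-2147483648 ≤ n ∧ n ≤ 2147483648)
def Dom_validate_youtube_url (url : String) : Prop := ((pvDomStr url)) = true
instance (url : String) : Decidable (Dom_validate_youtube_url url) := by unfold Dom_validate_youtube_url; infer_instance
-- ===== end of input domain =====

-- B replaces per-pattern substring searches by a single left-to-right scan testing each position; alternative decomposition, not faster.


-- ===== PORT A =====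
def pvPatterns : List (List Char) :=
  ["youtube.com/watch?v=".toList, "youtu.be/".toList, "youtube.com/embed/".toList, "youtube.com/v/".toList]

-- any(pattern in url for pattern in youtube_patterns)
def validate_youtube_url (url : String) : Bool :=
  pvPatterns.any (fun p => PySem.Chars.isIn p url.toList)

-- ===== PORT B =====
-- one scan: while s: if any(s.startswith(p) ...): return True; s = s[1:]
def pvScan (s : List Char) : Bool :=
  match s with
  | [] => false
  | c :: t =>
    if pvPatterns.any (fun p => PySem.Chars.startswith (c :: t) p) then true
    else pvScan t

def validate_youtube_url_alt (url : String) : Bool := pvScan url.toList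

-- ===== PRECONDITION & SPEC =====
def Spec_validate_youtube_url (url : String) (out : Bool) : Prop := out = validate_youtube_url_alt url
instance (url : String) (out : Bool) : Decidable (Spec_validate_youtube_url url out) := by unfold Spec_validate_youtube_url; infer_instance

-- ===== CLAIM (what is proved, stated in full; the proofs are below) =====
def Claim_equal_validate_youtube_url : Prop := ∀ (url : String), Dom_validate_youtube_url url → Spec_validate_youtube_url url (validate_youtube_url url)

-- ===== LEMMAS AND PROOFS =====

-- ===== VERDICT (by name: the statement is the Claim_ definition above) =====
theorem pvScan_iff (s : List Char) :
    pvScan s = true ↔ ∃ p ∈ pvPatterns, p <:+: s := by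
  induction s with
  | nil =>
    simp [pvScan, pvPatterns]
  | cons c t ih =>
    simp only [pvScan]
    by_cases h : pvPatterns.any (fun p => PySem.Chars.startswith (c :: t) p) = true
    · simp only [h, if_true, true_iff]
      rcases List.any_eq_true.mp h with ⟨p, hp, hsw⟩
      exact ⟨p, hp, (PySem.Chars.startswith_iff _ _).mp hsw |>.isInfix⟩
    · rw [Bool.not_eq_true] at h
      simp only [h, Bool.false_eq_true, if_false, ih]
      constructor
      · rintro ⟨p, hp, hinf⟩; exact ⟨p, hp, hinf.trans (List.suffix_cons c t).isInfix⟩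
      · rintro ⟨p, hp, hinf⟩
        rcases List.infix_cons_iff.mp hinf with hpre | hinf'
        · exact absurd (List.any_eq_true.mpr ⟨p, hp, (PySem.Chars.startswith_iff _ _).mpr hpre⟩)
            (by simp [h])
        · exact ⟨p, hp, hinf'⟩

theorem validate_youtube_url_spec : Claim_equal_validate_youtube_url := by
  intro url _
  show validate_youtube_url url = validate_youtube_url_alt url
  unfold validate_youtube_url validate_youtube_url_alt
  rcases h : pvScan url.toList with _ | _
  · rw [Bool.eq_false_iff] at h ⊢
    intro ha
    rcases List.any_eq_true.mp ha with ⟨p, hp, hin⟩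
    exact h ((pvScan_iff _).mpr ⟨p, hp, (PySem.Chars.isIn_iff_infix _ _).mp hin⟩)
  · rcases (pvScan_iff _).mp h with ⟨p, hp, hinf⟩
    exact List.any_eq_true.mpr ⟨p, hp, (PySem.Chars.isIn_iff_infix _ _).mpr hinf⟩
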